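-- pv_equiv track=rewrite | github.com/kevinveenbirkenbach/infinito-nexus | tests/lint/ansible/test_no_inline_multiline_sql.py | _count_sql_lines
-- ===== SOURCE A (Python) =====
-- _SQL_KEYWORD_LEADERS = (
--     "ALTER ",
--     "BEGIN;",
--     "BEGIN ",
--     "COMMIT;",
--     "COMMIT ",
--     "CREATE ",
--     "DELETE ",
--     "DO $$",
--     "DROP ",
--     "FROM ",
--     "GRANT ",
--     "INSERT ",
--     "JOIN ",
--     "MERGE ",
--     "ON CONFLICT ",
--     "REVOKE ",
--     "ROLLBACK;",
--     "ROLLBACK ",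
--     "SELECT ",
--     "SET ",
--     "TRUNCATE ",
--     "UPDATE ",
--     "UPSERT ",
--     "VALUES ",
--     "WHERE ",
--     "WITH ",
-- )
--
-- def _is_sql_line(line: str) -> bool:
--     stripped = line.strip().upper()
--     return any(stripped.startswith(kw) for kw in _SQL_KEYWORD_LEADERS)
--
-- def _count_sql_lines(value: str) -> tuple[int, str]:
--     """Return ``(consecutive_sql_line_count, first_sql_line)`` for the
--     longest run of SQL-looking lines inside *value*. Empty / whitespace
--     lines do not break the run; a run is only broken by a non-empty line
--     that does not look like SQL.
--     """
--     best_run = 0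
--     best_first = ""
--     current_run = 0
--     current_first = ""
--     for raw in value.splitlines():
--         if not raw.strip():
--             continue
--         if _is_sql_line(raw):
--             if current_run == 0:
--                 current_first = raw.strip()
--             current_run += 1
--             if current_run > best_run:
--                 best_run = current_run
--                 best_first = current_first
--         else:
--             current_run = 0
--             current_first = ""
--     return best_run, best_first
-- ===== SOURCE B (Python) =====
-- _SQL_KEYWORD_LEADERS = (
--     "ALTER ", "BEGIN;", "BEGIN ", "COMMIT;", "COMMIT ", "CREATE ", "DELETE ",
--     "DO $$", "DROP ", "FROM ", "GRANT ", "INSERT ", "JOIN ", "MERGE ",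
--     "ON CONFLICT ", "REVOKE ", "ROLLBACK;", "ROLLBACK ", "SELECT ", "SET ",
--     "TRUNCATE ", "UPDATE ", "UPSERT ", "VALUES ", "WHERE ", "WITH ",
-- )
--
-- def _is_sql_line(line: str) -> bool:
--     stripped = line.strip().upper()
--     return any(stripped.startswith(kw) for kw in _SQL_KEYWORD_LEADERS)
--
-- def _count_sql_lines(value: str) -> tuple[int, str]:
--     # Group-based decomposition: collect the maximal runs of SQL-looking
--     # lines (blank lines never break a run), then pick the longest group
--     # (first one wins on ties, as Python's max does).
--     lines = [raw for raw in value.splitlines() if raw.strip()]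
--     groups = []
--     cur = []
--     for raw in lines:
--         if _is_sql_line(raw):
--             cur.append(raw.strip())
--         else:
--             if cur:
--                 groups.append(cur)
--             cur = []
--     if cur:
--         groups.append(cur)
--     if not groups:
--         return 0, ""
--     best = max(groups, key=len)
--     return len(best), best[0]
-- ===== Notes on version B (the rewrite author's own statement) =====
-- stated objective: alternative
-- what changed: A tracks best run/first-line with four mutable loop variables updated inline; B first collects the maximal runs of SQL lines as explicit groups (blank lines filtered out up front) and then selects the longest group with max(groups, key=len).
import Mathlib
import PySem

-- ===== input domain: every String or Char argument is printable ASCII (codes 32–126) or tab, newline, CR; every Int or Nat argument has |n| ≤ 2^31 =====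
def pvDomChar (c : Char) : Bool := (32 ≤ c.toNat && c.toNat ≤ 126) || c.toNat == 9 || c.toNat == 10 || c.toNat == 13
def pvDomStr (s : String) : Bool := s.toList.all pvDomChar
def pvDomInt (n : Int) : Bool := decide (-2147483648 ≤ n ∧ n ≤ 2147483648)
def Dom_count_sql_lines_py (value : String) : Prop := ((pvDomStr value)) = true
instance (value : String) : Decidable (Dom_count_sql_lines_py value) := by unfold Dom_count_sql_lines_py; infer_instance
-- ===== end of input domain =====

-- B replaces A's four-variable running-best loop by a two-phase decomposition
-- (collect the maximal runs as groups, then pick the longest group with max);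
-- objective: alternative (same cost, different structure).

-- ===== PORT A =====
def pvSqlKeywordLeaders : List String :=
  ["ALTER ", "BEGIN;", "BEGIN ", "COMMIT;", "COMMIT ", "CREATE ", "DELETE ",
   "DO $$", "DROP ", "FROM ", "GRANT ", "INSERT ", "JOIN ", "MERGE ",
   "ON CONFLICT ", "REVOKE ", "ROLLBACK;", "ROLLBACK ", "SELECT ", "SET ",
   "TRUNCATE ", "UPDATE ", "UPSERT ", "VALUES ", "WHERE ", "WITH "]

def pvIsSqlLine (line : String) : Bool :=
  let stripped := PySem.Str.upper (PySem.Str.strip line)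
  pvSqlKeywordLeaders.any (fun kw => PySem.Str.startswith stripped kw)

-- the body of A's for-loop, one iteration on the running state
-- (best_run, best_first, current_run, current_first)
def pvLoopA (st : Int × String × Int × String) (raw : String) :
    Int × String × Int × String :=
  let (bestRun, bestFirst, curRun, curFirst) := st
  if PySem.Str.strip raw = "" then st
  else if pvIsSqlLine raw then
    let curFirst' := if curRun = 0 then PySem.Str.strip raw else curFirst
    let curRun' := curRun + 1
    if curRun' > bestRun then (curRun', curFirst', curRun', curFirst')
    else (bestRun, bestFirst, curRun', curFirst')
  else (bestRun, bestFirst, 0, "")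

def count_sql_lines_py (value : String) : Int × String :=
  let st := (PySem.Str.splitlines value).foldl pvLoopA (0, "", 0, "")
  (st.1, st.2.1)

-- ===== PORT B =====
-- step of Source B's grouping loop: append the stripped SQL line to the open
-- group, or close the open group on a non-empty non-SQL line
def pvGroupStep (st : List (List String) × List String) (raw : String) :
    List (List String) × List String :=
  if pvIsSqlLine raw then (st.1, st.2 ++ [PySem.Str.strip raw])
  else (if st.2 = [] then st.1 else st.1 ++ [st.2], [])

-- Source B's final selection: max(groups, key=len) (Python max: FIRST maximal
-- group) or (0, ""); 'best[0]' is ported as headD "" — every group Source B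
-- builds is non-empty, so this is the value Python returns.
def pvBestOf (gs : List (List String)) : Int × String :=
  match PySem.List.max? gs (fun g => g.length) with
  | none => (0, "")
  | some g => ((g.length : Int), g.headD "")

def count_sql_lines_py_alt (value : String) : Int × String :=
  let lines := (PySem.Str.splitlines value).filter
    (fun raw => !(PySem.Str.strip raw == ""))
  let st := lines.foldl pvGroupStep ([], [])
  pvBestOf (if st.2 = [] then st.1 else st.1 ++ [st.2])

-- ===== PRECONDITION & SPEC =====
def Spec_count_sql_lines_py (value : String) (out : Int × String) : Prop := out = count_sql_lines_py_alt value
instance (value : String) (out : Int × String) : Decidable (Spec_count_sql_lines_py value out) := by unfold Spec_count_sql_lines_py; infer_instance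

-- ===== CLAIM (what is proved, stated in full; the proofs are below) =====
def Claim_equal_count_sql_lines_py : Prop := ∀ (value : String), Dom_count_sql_lines_py value → Spec_count_sql_lines_py value (count_sql_lines_py value)

-- ===== LEMMAS AND PROOFS =====

-- A's loop step without the blank-line guard
def pvStepA (st : Int × String × Int × String) (raw : String) :
    Int × String × Int × String :=
  let (bestRun, bestFirst, curRun, curFirst) := st
  if pvIsSqlLine raw then
    let curFirst' := if curRun = 0 then PySem.Str.strip raw else curFirst
    let curRun' := curRun + 1
    if curRun' > bestRun then (curRun', curFirst', curRun', curFirst')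
    else (bestRun, bestFirst, curRun', curFirst')
  else (bestRun, bestFirst, 0, "")

-- abstraction: B's grouping state determines A's whole loop state
def pvAbs (st : List (List String) × List String) : Int × String × Int × String :=
  let o := pvBestOf (if st.2 = [] then st.1 else st.1 ++ [st.2])
  (o.1, o.2, (st.2.length : Int), st.2.headD "")

theorem pvMax?_append_none {gs : List (List String)} {c : List String}
    (h : PySem.List.max? gs (fun g => g.length) = none) :
    PySem.List.max? (gs ++ [c]) (fun g => g.length) = some c := by
  simp only [PySem.List.max?] at h ⊢
  rw [List.foldl_append, h]
  rfl

theorem pvMax?_append_some {gs : List (List String)} {c m : List String}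
    (h : PySem.List.max? gs (fun g => g.length) = some m) :
    PySem.List.max? (gs ++ [c]) (fun g => g.length) =
      if m.length < c.length then some c else some m := by
  simp only [PySem.List.max?] at h ⊢
  rw [List.foldl_append, h]
  rfl

theorem pvBestOf_append_none {gs : List (List String)} {c : List String}
    (h : PySem.List.max? gs (fun g => g.length) = none) :
    pvBestOf (gs ++ [c]) = ((c.length : Int), c.headD "") := by
  simp [pvBestOf, pvMax?_append_none h]

theorem pvBestOf_append_some {gs : List (List String)} {c m : List String}
    (h : PySem.List.max? gs (fun g => g.length) = some m) :
    pvBestOf (gs ++ [c]) =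
      if m.length < c.length then ((c.length : Int), c.headD "")
      else ((m.length : Int), m.headD "") := by
  rw [pvBestOf, pvMax?_append_some h]
  by_cases hm : m.length < c.length <;> simp [hm]

theorem pvLoopA_eq (st : Int × String × Int × String) (raw : String) :
    pvLoopA st raw =
      if PySem.Str.strip raw = "" then st else pvStepA st raw := by
  rcases st with ⟨a, b, c, d⟩
  by_cases h : PySem.Str.strip raw = "" <;> simp [pvLoopA, pvStepA, h]

theorem pvStep_comm (st : List (List String) × List String) (raw : String) :
    pvStepA (pvAbs st) raw = pvAbs (pvGroupStep st raw) := by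
  rcases st with ⟨gs, cur⟩
  by_cases hsql : pvIsSqlLine raw
  · -- SQL line: the open group grows by one element
    rcases cur with _ | ⟨x, t⟩ <;>
      rcases h : PySem.List.max? gs (fun g => g.length) with _ | m
    · simp [pvStepA, pvGroupStep, pvAbs, hsql]
      rw [pvBestOf_append_none h]
      simp [pvBestOf, h]
    · simp [pvStepA, pvGroupStep, pvAbs, hsql]
      rw [pvBestOf_append_some h]
      simp [pvBestOf, h]
      split_ifs <;> simp_all
    · simp [pvStepA, pvGroupStep, pvAbs, hsql]
      rw [pvBestOf_append_none h, pvBestOf_append_none h]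
      simp
      intro h2
      omega
    · simp [pvStepA, pvGroupStep, pvAbs, hsql]
      rw [pvBestOf_append_some h, pvBestOf_append_some h]
      simp
      split_ifs <;> simp_all <;> omega
  · -- non-SQL line: the open group closes, the best pair is unchanged
    rcases cur with _ | ⟨x, t⟩ <;> simp [pvStepA, pvGroupStep, pvAbs, hsql]

theorem pvFold_comm (l : List String) (st : List (List String) × List String) :
    l.foldl pvStepA (pvAbs st) = pvAbs (l.foldl pvGroupStep st) := by
  induction l generalizing st with
  | nil => rfl
  | cons x t ih => simp [List.foldl_cons, pvStep_comm, ih]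

-- ===== VERDICT (by name: the statement is the Claim_ definition above) =====
theorem count_sql_lines_py_spec : Claim_equal_count_sql_lines_py := by
  intro value _
  show count_sql_lines_py value = count_sql_lines_py_alt value
  unfold count_sql_lines_py count_sql_lines_py_alt
  have h1 : (PySem.Str.splitlines value).foldl pvLoopA (0, "", 0, "") =
      ((PySem.Str.splitlines value).filter
        (fun raw => !(PySem.Str.strip raw == ""))).foldl pvStepA (0, "", 0, "") := by
    rw [List.foldl_filter]
    apply PySem.List.foldl_congr_mem
    intro acc x _
    rw [pvLoopA_eq]
    by_cases h : PySem.Str.strip x = "" <;> simp [h]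
  rw [h1]
  have h0 : pvAbs ([], []) = ((0 : Int), "", (0 : Int), "") := by
    simp [pvAbs, pvBestOf, PySem.List.max?]
  rw [← h0, pvFold_comm]
  rcases h : List.foldl pvGroupStep ([], [])
      ((PySem.Str.splitlines value).filter (fun raw => !(PySem.Str.strip raw == "")))
    with ⟨gs, cur⟩
  simp [h, pvAbs]
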